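-- pv_equiv track=rewrite | github.com/Ownax-vit/parseAviPublic | analyst/utils.py | getNewViews
-- ===== SOURCE A (Python) =====
-- def getNewViews(dataViews:dict) -> dict:
--     """
--         Из совокупных данных просмотров извлекает
--         разницу между днями как количество новых просмотров
--     """
--     newViews = {}
--     for key, value in dataViews.items():
--         if key not in newViews:
--             newViews[key] = []
--         last = value[0][1]
--         for i in value:
--             newViews[key].append([i[0], i[1]-last])
--             last = i[1]
--     return newViews
-- ===== SOURCE B (Python) =====
-- def _diffRows(value: list) -> list:
--     """Columnar: split into day/count columns, shift the count column, subtract."""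
--     days = [row[0] for row in value]
--     counts = [row[1] for row in value]
--     shifted = [counts[0]] + counts[:-1]
--     return [[d, c - p] for d, c, p in zip(days, counts, shifted)]
--
--
-- def getNewViews(dataViews: dict) -> dict:
--     """
--         Из совокупных данных просмотров извлекает
--         разницу между днями как количество новых просмотров
--     """
--     return {key: _diffRows(value) for key, value in dataViews.items()}
-- ===== Notes on version B (the rewrite author's own statement) =====
-- stated objective: alternative
-- what changed: B replaces A's single pass with a running `last` accumulator mutating newViews[key] by a staged columnar computation: it extracts the day and count columns, builds a shifted count column ([counts[0]] + counts[:-1]), and subtracts the two columns elementwise, assembling each key's list in one dict comprehension.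
import Mathlib
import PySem

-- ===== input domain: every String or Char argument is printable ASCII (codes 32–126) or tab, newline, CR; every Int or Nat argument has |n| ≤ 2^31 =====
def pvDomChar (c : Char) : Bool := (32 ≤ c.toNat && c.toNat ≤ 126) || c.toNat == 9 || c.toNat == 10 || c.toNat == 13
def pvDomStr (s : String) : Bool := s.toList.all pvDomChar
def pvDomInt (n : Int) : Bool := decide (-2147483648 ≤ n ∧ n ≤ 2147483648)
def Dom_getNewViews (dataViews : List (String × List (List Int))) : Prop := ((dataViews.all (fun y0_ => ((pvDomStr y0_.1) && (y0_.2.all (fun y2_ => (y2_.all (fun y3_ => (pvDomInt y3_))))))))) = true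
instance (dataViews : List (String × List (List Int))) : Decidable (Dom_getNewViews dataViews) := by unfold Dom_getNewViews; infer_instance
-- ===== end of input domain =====

-- B replaces A's running-`last` accumulator pass by a staged columnar computation per key:
-- extract the day and count columns, shift the count column, subtract elementwise.

-- ===== PORT A =====
def getNewViews (dataViews : List (String × List (List Int))) : List (String × List (List Int)) :=
  (dataViews.foldl
    (fun (newViews : PySem.Dict String (List (List Int))) kv =>
      let key := kv.1
      let value := kv.2
      let newViews := if newViews.contains key then newViews else newViews.insert key []
      let last : Int := PySem.List.pyGetD (PySem.List.pyGetD value 0 []) 1 0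
      (value.foldl
        (fun (p : PySem.Dict String (List (List Int)) × Int) i =>
          (p.1.modify key []
            (fun l => l ++ [[PySem.List.pyGetD i 0 0, PySem.List.pyGetD i 1 0 - p.2]]),
           PySem.List.pyGetD i 1 0))
        (newViews, last)).1)
    PySem.Dict.empty).items

-- ===== PORT B =====
-- _diffRows: columns, shifted count column, elementwise subtraction
def pvDiffRows (value : List (List Int)) : List (List Int) :=
  let days := value.map (fun r => PySem.List.pyGetD r 0 0)
  let counts := value.map (fun r => PySem.List.pyGetD r 1 0)
  let shifted := PySem.List.pyGetD counts 0 0 :: PySem.List.slice counts none (some (-1))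
  (days.zip (counts.zip shifted)).map (fun t => [t.1, t.2.1 - t.2.2])

def getNewViews_alt (dataViews : List (String × List (List Int))) : List (String × List (List Int)) :=
  dataViews.map (fun kv => (kv.1, pvDiffRows kv.2))

-- ===== PRECONDITION & SPEC =====
-- Pre_ excludes only inputs on which the Python A raises or that no dict can present:
-- duplicate keys cannot occur in a Python dict argument, and an empty value list or an
-- inner list of length < 2 makes A raise IndexError (value[0][1] / i[1]).
def Pre_getNewViews (dataViews : List (String × List (List Int))) : Prop :=
  (dataViews.map Prod.fst).Nodup ∧
    ∀ kv ∈ dataViews, kv.2 ≠ [] ∧ ∀ i ∈ kv.2, 2 ≤ i.length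
instance (dataViews : List (String × List (List Int))) : Decidable (Pre_getNewViews dataViews) := by
  unfold Pre_getNewViews; infer_instance
def pvWitness_getNewViews : (List (String × List (List Int))) :=
  [("a", [[1, 10], [2, 15]]), ("b", [[1, 3]])]
def Spec_getNewViews (dataViews : List (String × List (List Int))) (out : List (String × List (List Int))) : Prop := out = getNewViews_alt dataViews
instance (dataViews : List (String × List (List Int))) (out : List (String × List (List Int))) : Decidable (Spec_getNewViews dataViews out) := by unfold Spec_getNewViews; infer_instance

-- ===== CLAIM (what is proved, stated in full; the proofs are below) =====
def Claim_equal_getNewViews : Prop := ∀ (dataViews : List (String × List (List Int))), Dom_getNewViews dataViews → Pre_getNewViews dataViews → Spec_getNewViews dataViews (getNewViews dataViews)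

-- ===== LEMMAS AND PROOFS =====

-- A's inner loop as a pure list function: the rows produced from `v` with accumulator `last`.
def pvPairs (last : Int) : List (List Int) → List (List Int)
  | [] => []
  | i :: t =>
      [PySem.List.pyGetD i 0 0, PySem.List.pyGetD i 1 0 - last] ::
        pvPairs (PySem.List.pyGetD i 1 0) t

-- inserting a key's own value back is a no-op (keys unique)
lemma pv_insert_getD_self (d : PySem.Dict String (List (List Int))) (k : String)
    (h : d.contains k = true) (hn : d.keys.Nodup) :
    d.insert k (d.getD k []) = d := by
  apply PySem.Dict.ext
  rw [PySem.Dict.items_insert, if_pos h]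
  conv_rhs => rw [← List.map_id d.items]
  apply List.map_congr_left
  rintro ⟨pk, pv⟩ hp
  by_cases hpk : pk = k
  · subst hpk
    have hg : d.getD pk [] = pv := PySem.Dict.getD_of_mem_items d hp hn []
    simp [hg]
  · simp [hpk]

-- A's inner loop only rewrites the entry at `key`, appending pvPairs.
lemma pv_inner (key : String) (v : List (List Int)) :
    ∀ (d : PySem.Dict String (List (List Int))) (last : Int),
      d.contains key = true → d.keys.Nodup →
      (v.foldl
        (fun (p : PySem.Dict String (List (List Int)) × Int) i =>
          (p.1.modify key []
            (fun l => l ++ [[PySem.List.pyGetD i 0 0, PySem.List.pyGetD i 1 0 - p.2]]),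
           PySem.List.pyGetD i 1 0))
        (d, last)).1 = d.insert key (d.getD key [] ++ pvPairs last v) := by
  induction v with
  | nil =>
      intro d last hc hn
      simp [pvPairs, pv_insert_getD_self d key hc hn]
  | cons i t ih =>
      intro d last hc hn
      have hmod : d.modify key []
          (fun l => l ++ [[PySem.List.pyGetD i 0 0, PySem.List.pyGetD i 1 0 - last]])
          = d.insert key (d.getD key [] ++ [[PySem.List.pyGetD i 0 0, PySem.List.pyGetD i 1 0 - last]]) :=
        PySem.Dict.ext_iff.mpr rfl
      simp only [List.foldl_cons, hmod]
      rw [ih _ _ (by simp) (PySem.Dict.nodup_keys_insert d key _ hn)]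
      rw [PySem.Dict.getD_insert_self, PySem.Dict.insert_insert_self]
      simp [pvPairs]

-- columnar form with an arbitrary shift seed equals A's accumulator rows
lemma pv_cols (v : List (List Int)) :
    ∀ (last : Int),
      ((v.map (fun r => PySem.List.pyGetD r 0 0)).zip
        ((v.map (fun r => PySem.List.pyGetD r 1 0)).zip
          (last :: (v.map (fun r => PySem.List.pyGetD r 1 0)).dropLast))).map
        (fun t => [t.1, t.2.1 - t.2.2])
      = pvPairs last v := by
  induction v with
  | nil => intro last; simp [pvPairs]
  | cons i t ih =>
      intro last
      cases t with
      | nil => simp [pvPairs]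
      | cons j u =>
          have h := ih (PySem.List.pyGetD i 1 0)
          simp only [List.map_cons, List.dropLast_cons₂, List.zip_cons_cons, pvPairs] at h ⊢
          obtain ⟨-, h2⟩ := List.cons_eq_cons.mp h
          rw [h2]

-- per key (nonempty value list): B's columnar list equals A's accumulator rows
lemma pv_key (v : List (List Int)) (h : v ≠ []) :
    pvPairs (PySem.List.pyGetD (PySem.List.pyGetD v 0 []) 1 0) v = pvDiffRows v := by
  cases v with
  | nil => exact absurd rfl h
  | cons x rest =>
      simp only [pvDiffRows]
      rw [PySem.List.slice_to_neg_one]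
      have h0 : PySem.List.pyGetD ((x :: rest).map (fun r => PySem.List.pyGetD r 1 0)) 0 0
          = PySem.List.pyGetD x 1 0 := by simp
      rw [h0, pv_cols (x :: rest) (PySem.List.pyGetD x 1 0)]
      simp [pvPairs]

-- A's outer loop over fresh distinct keys appends exactly B's per-key rows.
lemma pv_outer (l : List (String × List (List Int))) :
    ∀ (d : PySem.Dict String (List (List Int))),
      d.keys.Nodup →
      (∀ kv ∈ l, d.contains kv.1 = false) →
      (l.map Prod.fst).Nodup →
      (∀ kv ∈ l, kv.2 ≠ []) →
      (l.foldl
        (fun (newViews : PySem.Dict String (List (List Int))) kv =>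
          let key := kv.1
          let value := kv.2
          let newViews := if newViews.contains key then newViews else newViews.insert key []
          let last : Int := PySem.List.pyGetD (PySem.List.pyGetD value 0 []) 1 0
          (value.foldl
            (fun (p : PySem.Dict String (List (List Int)) × Int) i =>
              (p.1.modify key []
                (fun l => l ++ [[PySem.List.pyGetD i 0 0, PySem.List.pyGetD i 1 0 - p.2]]),
               PySem.List.pyGetD i 1 0))
            (newViews, last)).1)
        d).items
      = d.items ++ l.map (fun kv => (kv.1, pvDiffRows kv.2)) := by
  induction l with
  | nil => intro d _ _ _ _; simp
  | cons kv t ih =>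
      intro d hn hfresh hnd hne
      have hck : d.contains kv.1 = false := hfresh kv (by simp)
      have hne0 : kv.2 ≠ [] := (hne kv (by simp))
      simp only [List.foldl_cons]
      have hstep :
          (kv.2.foldl
            (fun (p : PySem.Dict String (List (List Int)) × Int) i =>
              (p.1.modify kv.1 []
                (fun l => l ++ [[PySem.List.pyGetD i 0 0, PySem.List.pyGetD i 1 0 - p.2]]),
               PySem.List.pyGetD i 1 0))
            (d.insert kv.1 [], PySem.List.pyGetD (PySem.List.pyGetD kv.2 0 []) 1 0)).1
          = d.insert kv.1 (pvDiffRows kv.2) := by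
        rw [pv_inner kv.1 kv.2 (d.insert kv.1 []) _
              (by simp)
              (PySem.Dict.nodup_keys_insert d kv.1 _ hn)]
        rw [PySem.Dict.getD_insert_self, PySem.Dict.insert_insert_self]
        rw [← pv_key kv.2 hne0]
        simp
      simp only [hck, Bool.false_eq_true, if_false, hstep]
      rw [ih (d.insert kv.1 _)
            (PySem.Dict.nodup_keys_insert d kv.1 _ hn)
            (by
              intro kv' hkv'
              have h1 : kv'.1 ≠ kv.1 := by
                have := hnd
                simp only [List.map_cons, List.nodup_cons] at this
                intro he
                exact this.1 (he ▸ List.mem_map_of_mem hkv')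
              simp [PySem.Dict.contains_insert, h1, hfresh kv' (by simp [hkv'])])
            (by simpa using hnd.of_cons)
            (fun kv' hkv' => hne kv' (by simp [hkv']))]
      rw [PySem.Dict.items_insert, if_neg (by simp [hck])]
      simp

-- ===== VERDICT (by name: the statement is the Claim_ definition above) =====
theorem getNewViews_spec : Claim_equal_getNewViews := by
  intro dataViews _ hpre
  unfold Spec_getNewViews getNewViews getNewViews_alt
  rw [pv_outer dataViews PySem.Dict.empty
        (by simp [PySem.Dict.keys_empty])
        (fun kv _ => PySem.Dict.contains_empty kv.1)
        hpre.1
        (fun kv hkv => (hpre.2 kv hkv).1)]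
  simp [PySem.Dict.empty]
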